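-- pv_equiv track=rewrite | github.com/DooDuZ/sparta_python | daily/boj1239.py | solution
-- ===== SOURCE A (Python) =====
-- from itertools import permutations
--
-- def solution(params):
--     def check(comb):
--         ret = 0
--         for i in range(len(comb)):
--             total = 0
--             for j in range(i, len(comb)):
--                 total += comb[j]
--                 if total == 50:
--                     ret += 1
--         return ret - 1
--
--     n, rates = params
--
--     cnt = 0
--
--     comb = list(permutations(rates))
--
--     for c in comb:
--         numbers = list(c)
--         cnt = max(cnt, check(numbers))
--
--     return cnt
-- ===== SOURCE B (Python) =====
-- from itertools import permutations
--
-- def solution(params):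
--     def check(comb):
--         total = 0
--         count = 0
--         seen = {0: 1}
--         for x in comb:
--             total += x
--             count += seen.get(total - 50, 0)
--             seen[total] = seen.get(total, 0) + 1
--         return count - 1
--
--     n, rates = params
--     cnt = 0
--     for c in permutations(rates):
--         cnt = max(cnt, check(list(c)))
--     return cnt
-- ===== Notes on version B (the rewrite author's own statement) =====
-- stated objective: alternative
-- what changed: The inner per-permutation counter is rewritten from a nested rescan of every subarray sum to a single prefix-sum pass with a hash counter seeded {0:1} that counts earlier prefixes equal to (running_sum - 50); the factorial outer loop over permutations dominates, so overall speed is unverified.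
import Mathlib
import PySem

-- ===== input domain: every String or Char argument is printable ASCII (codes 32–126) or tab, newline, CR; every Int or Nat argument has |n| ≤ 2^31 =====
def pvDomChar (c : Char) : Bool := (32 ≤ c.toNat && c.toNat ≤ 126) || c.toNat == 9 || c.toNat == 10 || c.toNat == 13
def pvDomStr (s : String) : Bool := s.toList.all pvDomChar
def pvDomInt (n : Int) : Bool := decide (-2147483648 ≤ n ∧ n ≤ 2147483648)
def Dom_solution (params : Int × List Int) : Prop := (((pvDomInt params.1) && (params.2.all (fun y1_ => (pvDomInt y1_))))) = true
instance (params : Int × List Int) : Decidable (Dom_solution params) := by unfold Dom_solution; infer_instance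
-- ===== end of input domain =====

-- B replaces A's nested subarray rescan per permutation with one prefix-sum pass over a
-- counter of previously seen prefix sums (seeded with {0: 1}); objective: alternative.

-- ===== PORT A =====
-- inner-loop body of A's check: total += comb[j]; if total == 50: ret += 1
def stepA (st : Int × Int) (v : Int) : Int × Int :=
  let total := st.1 + v
  (total, if total = 50 then st.2 + 1 else st.2)

def checkA (comb : List Int) : Int :=
  ((PySem.List.pyRange 0 (comb.length : Int)).foldl (fun ret i =>
    ((PySem.List.pyRange i (comb.length : Int)).foldl
      (fun st j => stepA st (PySem.List.pyGetD comb j 0)) ((0 : Int), ret)).2) 0) - 1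

def solution (params : Int × List Int) : Int :=
  let rates := params.2
  (PySem.List.permutations rates rates.length).foldl
    (fun cnt c => max cnt (checkA c)) 0

-- ===== PORT B =====
-- loop body of B's check: total += x; count += seen.get(total-50, 0); seen[total] = seen.get(total,0)+1
def stepB (st : Int × Int × PySem.Dict Int Int) (x : Int) : Int × Int × PySem.Dict Int Int :=
  let total := st.1 + x
  let count := st.2.1 + st.2.2.getD (total - 50) 0
  (total, count, st.2.2.modify total 0 (· + 1))

def checkB (comb : List Int) : Int :=
  (comb.foldl stepB ((0 : Int), (0 : Int), PySem.Dict.ofList [((0 : Int), (1 : Int))])).2.1 - 1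

def solution_alt (params : Int × List Int) : Int :=
  let rates := params.2
  (PySem.List.permutations rates rates.length).foldl
    (fun cnt c => max cnt (checkB c)) 0

-- ===== PRECONDITION & SPEC =====
def Spec_solution (params : Int × List Int) (out : Int) : Prop := out = solution_alt params
instance (params : Int × List Int) (out : Int) : Decidable (Spec_solution params out) := by unfold Spec_solution; infer_instance

-- ===== CLAIM (what is proved, stated in full; the proofs are below) =====
def Claim_equal_solution : Prop := ∀ (params : Int × List Int), Dom_solution params → Spec_solution params (solution params)

-- ===== LEMMAS AND PROOFS =====

-- U s l = number of nonempty prefixes of l whose sum, added to s, equals 50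
def U (s : Int) : List Int → Int
  | [] => 0
  | x :: xs => (if s + x = 50 then 1 else 0) + U (s + x) xs

-- T acc s l: pairs counted by B's pass, acc = multiset of prefix sums seen so far, s = running sum
def T (acc : List Int) (s : Int) : List Int → Int
  | [] => 0
  | x :: xs => (acc.count (s + x - 50) : Int) + T (acc ++ [s + x]) (s + x) xs

-- Asum l = sum over all start indices i of U 0 (l.drop i): A's total count
def Asum : List Int → Int
  | [] => 0
  | x :: xs => U 0 (x :: xs) + Asum xs

theorem foldl_stepA (l : List Int) (s r : Int) :
    (l.foldl stepA (s, r)).2 = r + U s l := by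
  induction l generalizing s r with
  | nil => simp [U]
  | cons x xs ih =>
    simp only [List.foldl_cons, stepA, U]
    rw [ih]
    split_ifs <;> ring

theorem range_sum_U (l : List Int) :
    ((List.range l.length).map (fun k => U 0 (l.drop k))).sum = Asum l := by
  induction l with
  | nil => simp [Asum]
  | cons x xs ih =>
    rw [List.length_cons, List.range_succ_eq_map]
    simp only [List.map_cons, List.map_map, List.sum_cons, Function.comp_def,
      List.drop_succ_cons, List.drop_zero]
    rw [ih, Asum]

theorem checkA_eq (comb : List Int) : checkA comb = Asum comb - 1 := by
  unfold checkA
  rw [PySem.List.pyRange_zero_natCast, List.foldl_map]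
  have hcongr : ∀ (ret : Int) (k : Nat), k ∈ List.range comb.length →
      ((PySem.List.pyRange (k : Int) (comb.length : Int)).foldl
        (fun st j => stepA st (PySem.List.pyGetD comb j 0)) ((0 : Int), ret)).2
      = ret + U 0 (comb.drop k) := by
    intro ret k _
    rw [PySem.List.foldl_pyRange_pyGetD' comb 0 stepA ((0 : Int), ret) (Int.natCast_nonneg k)]
    rw [Int.toNat_natCast, foldl_stepA]
  rw [PySem.List.foldl_congr_mem _ _ (fun ret k => ret + U 0 (comb.drop k)) _ hcongr]
  rw [PySem.List.foldl_add]
  rw [range_sum_U]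
  ring

theorem foldl_stepB (l : List Int) (acc : List Int) (s c : Int) (d : PySem.Dict Int Int)
    (h : ∀ v : Int, d.getD v 0 = (acc.count v : Int)) :
    (l.foldl stepB (s, c, d)).2.1 = c + T acc s l := by
  induction l generalizing acc s c d with
  | nil => simp [T]
  | cons x xs ih =>
    simp only [List.foldl_cons, stepB, T]
    rw [ih (acc ++ [s + x]) (s + x) _ _ ?_]
    · rw [h]; ring
    · intro v
      rw [PySem.Dict.getD_modify, List.count_append, List.count_singleton]
      by_cases hv : v = s + x
      · simp [hv, h]
      · simp [hv, h, Ne.symm hv]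

theorem count_map_ite (acc : List Int) (s x : Int) :
    (acc.map (fun p => if s - p + x = 50 then (1 : Int) else 0)).sum
      = (acc.count (s + x - 50) : Int) := by
  induction acc with
  | nil => simp
  | cons p ps ih =>
    simp only [List.map_cons, List.sum_cons, List.count_cons, ih]
    by_cases hp : s - p + x = 50
    · have hpe : p = s + x - 50 := by omega
      rw [if_pos hp, hpe]
      simp
      ring
    · have hpe : ¬ (p = s + x - 50) := by omega
      simp [hp, hpe]

theorem U_cons_Asum (xs : List Int) : U 0 xs + Asum xs.tail = Asum xs := by
  cases xs with
  | nil => simp [U, Asum]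
  | cons y ys => simp [Asum]

theorem T_eq (l : List Int) : ∀ (acc : List Int) (s : Int),
    T acc s l = (acc.map (fun p => U (s - p) l)).sum + Asum l.tail := by
  induction l with
  | nil => intro acc s; simp [T, U, Asum]
  | cons x xs ih =>
    intro acc s
    rw [T, ih (acc ++ [s + x]) (s + x)]
    rw [List.map_append, List.sum_append]
    simp only [List.map_singleton, List.sum_singleton, sub_self]
    have h1 : (acc.map (fun p => U (s - p) (x :: xs))).sum
        = (acc.map (fun p => if s - p + x = 50 then (1 : Int) else 0)).sum
          + (acc.map (fun p => U (s + x - p) xs)).sum := by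
      rw [← List.sum_map_add]
      apply congrArg
      apply List.map_congr_left
      intro p _
      have hx : s + x - p = s - p + x := by ring
      rw [U, hx]
    rw [h1, count_map_ite]
    rw [List.tail_cons, ← U_cons_Asum xs]
    ring

theorem checkB_eq (comb : List Int) : checkB comb = Asum comb - 1 := by
  unfold checkB
  rw [foldl_stepB comb [0] 0 0 _ ?_]
  · rw [T_eq comb [0] 0]
    simp only [List.map_singleton, List.sum_singleton, sub_zero]
    rw [U_cons_Asum comb]
    ring
  · intro v
    have h0 : PySem.Dict.ofList [((0 : Int), (1 : Int))] = PySem.Dict.empty.insert 0 1 := rfl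
    rw [h0, PySem.Dict.getD_insert]
    by_cases hv : v = 0
    · simp [hv]
    · have hv' : ¬ (0 = v) := fun h => hv h.symm
      simp [hv, hv', PySem.Dict.getD_empty]

theorem check_eq (comb : List Int) : checkA comb = checkB comb := by
  rw [checkA_eq, checkB_eq]

-- ===== VERDICT (by name: the statement is the Claim_ definition above) =====
theorem solution_spec : Claim_equal_solution := by
  intro params _
  unfold Spec_solution solution solution_alt
  simp only [check_eq]
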